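-- pv_equiv track=rewrite | github.com/nguyentieuat/ai-korean-study-partner | ai-korean-be/mfa_service/train_w2v2/ko_phonology_ipa.py | _segment_syllables
-- ===== SOURCE A (Python) =====
-- from typing import List, Tuple, Optional
--
-- VOWELS = {
--     "a","e","i","o","u",
--     "ɐ","ʌ","ɛ","ɯ","ø","y","ɨ","ə","ɤ","ʊ","œ","ɜ","æ","ʉ","ɒ"
-- }
--
-- def _is_vowel(x: Optional[str]) -> bool:
--     return x in VOWELS if x else False
--
-- def _segment_syllables(ipa: List[str]) -> List[Tuple[List[str], List[str]]]:
--     """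
--     Rough syllabification:
--       - vowel starts a syllable; preceding consonants become onset
--       - consonants after the first vowel in a syllable go to coda
--     Returns: list of (onset, rime), where rime=[nucleus-vowel, optional coda...]
--     """
--     syllables: List[Tuple[List[str], List[str]]] = []
--     cur_onset: List[str] = []
--     cur_rime: List[str] = []
--     seen_vowel = False
--     for ph in ipa:
--         if _is_vowel(ph):
--             if seen_vowel:
--                 syllables.append((cur_onset, cur_rime))
--                 cur_onset, cur_rime = [], []
--             seen_vowel = True
--             cur_rime.append(ph)
--         else:
--             if not seen_vowel:
--                 cur_onset.append(ph)
--             else: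
--                 cur_rime.append(ph)
--     if seen_vowel:
--         syllables.append((cur_onset, cur_rime))
--     elif cur_onset:  # no vowel at all (rare)
--         syllables.append((cur_onset, []))
--     return syllables
-- ===== SOURCE B (Python) =====
-- from typing import List, Tuple, Optional
--
-- VOWELS = {
--     "a","e","i","o","u",
--     "ɐ","ʌ","ɛ","ɯ","ø","y","ɨ","ə","ɤ","ʊ","œ","ɜ","æ","ʉ","ɒ"
-- }
--
-- def _is_vowel(x: Optional[str]) -> bool:
--     return x in VOWELS if x else False
--
-- def _segment_syllables(ipa: List[str]) -> List[Tuple[List[str], List[str]]]: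
--     n = len(ipa)
--     i = 0
--     while i < n and not _is_vowel(ipa[i]):   # leading consonant run -> onset
--         i += 1
--     onset = ipa[:i]
--     if i == n:
--         return [(onset, [])] if onset else []
--     rimes = []
--     while i < n:                             # ipa[i] is a vowel: one rime per iteration
--         j = i + 1
--         while j < n and not _is_vowel(ipa[j]):   # attach following consonants as coda
--             j += 1
--         rimes.append(ipa[i:j])
--         i = j
--     return [(onset, rimes[0])] + [([], r) for r in rimes[1:]]
-- ===== Notes on version B (the rewrite author's own statement) =====
-- stated objective: alternative
-- what changed: Replaces A's flag-based single pass with mutable onset/rime accumulators by a recursive chunking decomposition: split off the leading consonant run, then recursively split the rest into vowel+coda chunks and attach the onset to the first chunk only.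
import Mathlib
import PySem

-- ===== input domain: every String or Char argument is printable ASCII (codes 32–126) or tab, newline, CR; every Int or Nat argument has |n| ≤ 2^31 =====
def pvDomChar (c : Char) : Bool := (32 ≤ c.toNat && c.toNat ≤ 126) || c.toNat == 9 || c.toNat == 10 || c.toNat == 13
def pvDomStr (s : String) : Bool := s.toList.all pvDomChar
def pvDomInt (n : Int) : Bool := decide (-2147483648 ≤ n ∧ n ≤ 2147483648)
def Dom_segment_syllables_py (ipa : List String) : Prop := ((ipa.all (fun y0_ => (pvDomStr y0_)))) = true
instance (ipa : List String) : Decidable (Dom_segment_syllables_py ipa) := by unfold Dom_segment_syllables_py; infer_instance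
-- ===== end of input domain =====

-- B replaces A's flag-based single pass by a recursive chunking decomposition (alternative, same cost).

-- shared module helper _is_vowel: 'x in VOWELS if x else False'
def pyIsVowel (x : String) : Bool :=
  if x = "" then false
  else decide (x ∈ (["a","e","i","o","u",
    "ɐ","ʌ","ɛ","ɯ","ø","y","ɨ","ə","ɤ","ʊ","œ","ɜ","æ","ʉ","ɒ"] : List String))

-- ===== PORT A =====
-- A's loop over ipa with state (syllables, cur_onset, cur_rime, seen_vowel), then the final flush
def segLoop : List String → List (List String × List String) → List String → List String → Bool → List (List String × List String)
  | [], syls, on, ri, seen =>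
      if seen then syls ++ [(on, ri)]
      else if on = [] then syls else syls ++ [(on, [])]
  | ph :: rest, syls, on, ri, seen =>
      if pyIsVowel ph then
        if seen then segLoop rest (syls ++ [(on, ri)]) [] [ph] true
        else segLoop rest syls on (ri ++ [ph]) true
      else
        if !seen then segLoop rest syls (on ++ [ph]) ri seen
        else segLoop rest syls on (ri ++ [ph]) seen

def segment_syllables_py (ipa : List String) : List (List String × List String) :=
  segLoop ipa [] [] [] false

-- ===== PORT B =====
-- _split_cons: maximal leading non-vowel run, recursively
def splitCons : List String → List String × List String
  | [] => ([], [])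
  | x :: xs =>
      if pyIsVowel x then ([], x :: xs)
      else
        let p := splitCons xs
        (x :: p.1, p.2)

theorem splitCons_snd_length : ∀ (xs : List String), (splitCons xs).2.length ≤ xs.length := by
  intro xs
  induction xs with
  | nil => simp [splitCons]
  | cons x xs ih =>
    simp only [splitCons]
    split
    · simp
    · simpa using Nat.le_succ_of_le ih

-- _rimes: chunk a vowel-initial list into vowel+coda runs
def rimesB : List String → List (List String)
  | [] => []
  | v :: xs =>
      let p := splitCons xs
      (v :: p.1) :: rimesB p.2
termination_by xs => xs.length
decreasing_by
  exact Nat.lt_succ_of_le (splitCons_snd_length xs)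

def segment_syllables_py_alt (ipa : List String) : List (List String × List String) :=
  match splitCons ipa with
  | (onset, []) => if onset = [] then [] else [(onset, [])]
  | (onset, v :: tl) =>
      let rs := rimesB (v :: tl)
      (onset, rs.headI) :: rs.tail.map (fun r => ([], r))

-- ===== PRECONDITION & SPEC =====
def Spec_segment_syllables_py (ipa : List String) (out : List (List String × List String)) : Prop := out = segment_syllables_py_alt ipa
instance (ipa : List String) (out : List (List String × List String)) : Decidable (Spec_segment_syllables_py ipa out) := by unfold Spec_segment_syllables_py; infer_instance

-- ===== CLAIM (what is proved, stated in full; the proofs are below) =====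
def Claim_equal_segment_syllables_py : Prop := ∀ (ipa : List String), Dom_segment_syllables_py ipa → Spec_segment_syllables_py ipa (segment_syllables_py ipa)

-- ===== LEMMAS AND PROOFS =====

theorem splitCons_head_vowel : ∀ (xs : List String) (v : String) (t : List String),
    (splitCons xs).2 = v :: t → pyIsVowel v = true := by
  intro xs
  induction xs with
  | nil => intro v t h; simp [splitCons] at h
  | cons x xs ih =>
    intro v t h
    simp only [splitCons] at h
    split at h
    · rename_i hv
      simp only at h
      obtain ⟨rfl, rfl⟩ := List.cons.injEq .. ▸ h
      exact hv
    · exact ih v t h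

-- consuming a consonant run with seen_vowel = false extends the onset
theorem consume_false : ∀ (xs : List String) (syls : List (List String × List String))
    (on ri : List String),
    segLoop xs syls on ri false = segLoop (splitCons xs).2 syls (on ++ (splitCons xs).1) ri false := by
  intro xs
  induction xs with
  | nil => intro syls on ri; simp [splitCons]
  | cons x xs ih =>
    intro syls on ri
    simp only [segLoop, splitCons]
    split
    · simp [segLoop, *]
    · simpa [List.append_assoc] using ih syls (on ++ [x]) ri

-- consuming a consonant run with seen_vowel = true extends the rime
theorem consume_true : ∀ (xs : List String) (syls : List (List String × List String))
    (on ri : List String),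
    segLoop xs syls on ri true = segLoop (splitCons xs).2 syls on (ri ++ (splitCons xs).1) true := by
  intro xs
  induction xs with
  | nil => intro syls on ri; simp [splitCons]
  | cons x xs ih =>
    intro syls on ri
    simp only [segLoop, splitCons]
    split
    · simp [segLoop, *]
    · simpa [List.append_assoc] using ih syls on (ri ++ [x])

-- characterization of the seen_vowel = true phase of A's loop via B's chunking
theorem loop_true_char : ∀ (n : ℕ) (xs : List String), xs.length ≤ n →
    ∀ (syls : List (List String × List String)) (on ri : List String),
    segLoop xs syls on ri true =
      syls ++ (on, ri ++ (splitCons xs).1) :: (rimesB (splitCons xs).2).map (fun r => ([], r)) := by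
  intro n
  induction n with
  | zero =>
    intro xs hlen syls on ri
    have hx : xs = [] := List.eq_nil_of_length_eq_zero (Nat.le_zero.mp hlen)
    subst hx; simp [segLoop, splitCons, rimesB]
  | succ n ih =>
    intro xs hlen syls on ri
    rw [consume_true]
    rcases hrest : (splitCons xs).2 with _ | ⟨v, tail⟩
    · simp [segLoop, rimesB]
    · have hv : pyIsVowel v = true := splitCons_head_vowel xs v tail hrest
      have htail : tail.length ≤ n := by
        have := splitCons_snd_length xs
        rw [hrest] at this
        simp only [List.length_cons] at this
        omega
      simp only [segLoop, hv, if_true]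
      rw [ih tail htail]
      simp [rimesB]

theorem segment_syllables_eq : ∀ (ipa : List String),
    segment_syllables_py ipa = segment_syllables_py_alt ipa := by
  intro ipa
  unfold segment_syllables_py segment_syllables_py_alt
  rw [consume_false]
  rcases hsc : splitCons ipa with ⟨pre, rest⟩
  rcases rest with _ | ⟨v, tail⟩
  · simp only [segLoop]
    split <;> simp_all
  · have hv : pyIsVowel v = true := splitCons_head_vowel ipa v tail (by rw [hsc])
    simp only [segLoop, hv, if_true, Bool.false_eq_true, if_false]
    rw [loop_true_char tail.length tail le_rfl]
    simp [rimesB]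

-- ===== VERDICT (by name: the statement is the Claim_ definition above) =====
theorem segment_syllables_py_spec : Claim_equal_segment_syllables_py := by
  intro ipa _
  unfold Spec_segment_syllables_py
  exact segment_syllables_eq ipa
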